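-- pv_equiv track=rewrite | github.com/eugene-okulik/sokolip | homework/ivan_sokolskii/Homework_8/Task_2.py | progression
-- ===== SOURCE A (Python) =====
-- def progression(limit=100):
--     a = 0
--     b = 1
--     count_1 = 0
--     while count_1 < limit:
--         yield a
--         a = b
--         b = a + b
--         count_1 += 1
-- ===== SOURCE B (Python) =====
-- def progression(limit=100):
--     # A's recurrence overwrites `a` before summing, so the i-th yield is
--     # simply the closed form: 0 for i == 0, else 2**(i-1) (as a shift). No running state.
--     for i in range(limit):
--         yield 0 if i == 0 else 1 << (i - 1)
-- ===== Notes on version B (the rewrite author's own statement) =====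
-- stated objective: alternative
-- what changed: Replaces A's stateful two-variable recurrence with a stateless per-index closed form: the i-th yield is computed directly as 0 if i==0 else 2**(i-1), no value carried between iterations.
import Mathlib
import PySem

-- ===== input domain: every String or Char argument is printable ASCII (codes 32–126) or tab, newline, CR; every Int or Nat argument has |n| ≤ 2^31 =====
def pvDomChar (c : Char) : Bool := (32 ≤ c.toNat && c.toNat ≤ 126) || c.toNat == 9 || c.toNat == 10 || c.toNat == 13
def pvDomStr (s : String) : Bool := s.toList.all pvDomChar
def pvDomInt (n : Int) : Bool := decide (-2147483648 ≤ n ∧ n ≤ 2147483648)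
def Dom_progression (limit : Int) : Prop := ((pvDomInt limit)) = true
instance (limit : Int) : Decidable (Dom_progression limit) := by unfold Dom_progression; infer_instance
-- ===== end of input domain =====

-- B replaces A's two-variable stateful recurrence (which in fact emits 0 then the powers of two,
-- since A overwrites `a` before the sum) with a stateless per-index closed form: alternative.


-- ===== PORT A =====
-- while count_1 < limit: yield a; a = b; b = a + b; count_1 += 1
-- the loop body runs exactly max(limit, 0) = limit.toNat times
def progressionAux (a b : Int) (n : Nat) : List Int :=
  match n with
  | 0 => []
  | Nat.succ m => a :: progressionAux b (b + b) m

def progression (limit : Int) : List Int := progressionAux 0 1 limit.toNat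

-- ===== PORT B =====
-- for i in range(limit): yield 0 if i == 0 else 1 << (i - 1)
-- Python's `1 << k` on a nonnegative k is exactly 2^k; ported as the power (exact here since i ≥ 1 in that branch)
def progression_alt (limit : Int) : List Int :=
  (PySem.List.pyRange 0 limit 1).map (fun i => if i == 0 then 0 else 2 ^ (i - 1).toNat)

-- ===== PRECONDITION & SPEC =====
def Spec_progression (limit : Int) (out : List Int) : Prop := out = progression_alt limit
instance (limit : Int) (out : List Int) : Decidable (Spec_progression limit out) := by unfold Spec_progression; infer_instance

-- ===== CLAIM (what is proved, stated in full; the proofs are below) =====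
def Claim_equal_progression : Prop := ∀ (limit : Int), Dom_progression limit → Spec_progression limit (progression limit)

-- ===== LEMMAS AND PROOFS =====
-- from a nonzero state c with second component c + c, A's loop emits c·2^k at position k
theorem aux_closed (n : Nat) : ∀ c : Int,
    progressionAux c (c + c) n = (List.range n).map (fun k => c * 2 ^ k) := by
  induction n with
  | zero => intro c; rfl
  | succ m ih =>
      intro c
      rw [List.range_succ_eq_map]
      simp only [progressionAux, List.map_cons, List.map_map]
      refine List.cons_eq_cons.mpr ⟨?_, ?_⟩
      · ring
      · rw [ih (c + c)]
        apply List.map_congr_left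
        intro k _
        simp [Function.comp, pow_succ]
        ring

-- ===== VERDICT (by name: the statement is the Claim_ definition above) =====
theorem progression_spec : Claim_equal_progression := by
  intro limit _
  unfold Spec_progression progression progression_alt
  rw [PySem.List.pyRange_one]
  have hz : (limit - 0).toNat = limit.toNat := by omega
  rw [hz, List.map_map]
  cases h : limit.toNat with
  | zero => rfl
  | succ m =>
      rw [List.range_succ_eq_map]
      simp only [progressionAux, List.map_cons, List.map_map]
      refine List.cons_eq_cons.mpr ⟨?_, ?_⟩
      · simp
      · rw [show (1 : Int) + 1 = 1 + 1 from rfl]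
        rw [show progressionAux 1 (1 + 1) m = progressionAux 1 ((1:Int) + 1) m from rfl]
        rw [aux_closed m 1]
        apply List.map_congr_left
        intro k _
        have : ((0 : Int) + (k + 1 : Nat)) ≠ 0 := by push_cast; omega
        simp only [Function.comp]
        rw [if_neg (by simpa using this)]
        push_cast
        simp
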